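-- pv_equiv track=rewrite | github.com/tartopum/MPF | mpf/analysis/linear_regression.py | format_design_matrix
-- ===== SOURCE A (Python) =====
-- def format_design_matrix(data):
--     """
--     B = AX
--
--     data = [
--         [day1, day2, day3],
--         [cons1, cons2, cons3]
--     ]
--
--     A = [
--         [1, day1, day1**2, cons1, cons1**2],
--         [1, day2, day2**2, cons2, cons2**2],
--         [1, day3, day3**2, cons3, cons3**2]
--     ]
--     """
--
--     A = []
--
--     for i in range(len(data[0])):
--         line = [1] # Offset
--
--         for series in data:
--             line.append(series[i])
--             line.append(series[i]**2)
--
--         A.append(line)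
--
--     return A
-- ===== SOURCE B (Python) =====
-- def format_design_matrix(data):
--     # Column-wise construction: build the offset column and, per series, a
--     # value column and a squares column, then assemble the rows by index.
--     n = len(data[0])
--     cols = [[1 for _ in range(n)]]
--     for series in data:
--         cols.append([series[i] for i in range(n)])
--         cols.append([series[i] ** 2 for i in range(n)])
--     return [[col[i] for col in cols] for i in range(n)]
-- ===== Notes on version B (the rewrite author's own statement) =====
-- stated objective: alternative
-- what changed: B builds the design matrix column-wise (offset column, then value and square columns per series) and assembles the rows by index at the end, instead of A's row-wise nested loops.
import Mathlib
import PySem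

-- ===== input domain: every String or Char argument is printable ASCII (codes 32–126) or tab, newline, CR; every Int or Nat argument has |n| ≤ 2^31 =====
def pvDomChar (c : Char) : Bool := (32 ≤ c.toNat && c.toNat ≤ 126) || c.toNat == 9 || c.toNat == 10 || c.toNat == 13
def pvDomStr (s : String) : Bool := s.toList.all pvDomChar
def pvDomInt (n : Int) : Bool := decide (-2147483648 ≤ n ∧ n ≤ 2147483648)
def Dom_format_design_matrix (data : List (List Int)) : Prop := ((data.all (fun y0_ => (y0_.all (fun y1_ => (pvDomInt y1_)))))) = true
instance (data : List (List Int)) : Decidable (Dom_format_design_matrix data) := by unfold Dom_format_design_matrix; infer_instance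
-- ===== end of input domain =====

-- B builds the matrix column-wise (offset column, then a value and a squares column per
-- series) and assembles rows by index, instead of A's row-wise nested loops; objective: alternative.

-- ===== PORT A =====
def format_design_matrix (data : List (List Int)) : List (List Int) :=
  (PySem.List.pyRange 0 ((PySem.List.pyGetD data 0 []).length : Int) 1).foldl
    (fun A i =>
      A ++ [data.foldl (fun line s =>
        line ++ [PySem.List.pyGetD s i 0, (PySem.List.pyGetD s i 0) ^ 2]) [1]])
    []

-- ===== PORT B =====
def format_design_matrix_alt (data : List (List Int)) : List (List Int) :=
  let n : Int := ((PySem.List.pyGetD data 0 []).length : Int)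
  let cols : List (List Int) := data.foldl (fun cols s =>
      cols ++ [(PySem.List.pyRange 0 n 1).map (fun i => PySem.List.pyGetD s i 0),
               (PySem.List.pyRange 0 n 1).map (fun i => (PySem.List.pyGetD s i 0) ^ 2)])
    [(PySem.List.pyRange 0 n 1).map (fun _ => (1 : Int))]
  (PySem.List.pyRange 0 n 1).map (fun i => cols.map (fun c => PySem.List.pyGetD c i 0))

-- ===== PRECONDITION & SPEC =====
-- Pre_ excludes exactly the inputs where Python A raises IndexError: empty data
-- (data[0]) or a series shorter than the first one (series[i]).
def Pre_format_design_matrix (data : List (List Int)) : Prop :=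
  data ≠ [] ∧ ∀ s ∈ data, (data.headD []).length ≤ s.length
instance (data : List (List Int)) : Decidable (Pre_format_design_matrix data) := by
  unfold Pre_format_design_matrix; infer_instance
def pvWitness_format_design_matrix : List (List Int) := [[1, 2, 3], [4, 5, 6]]

def Spec_format_design_matrix (data : List (List Int)) (out : List (List Int)) : Prop := out = format_design_matrix_alt data
instance (data : List (List Int)) (out : List (List Int)) : Decidable (Spec_format_design_matrix data out) := by unfold Spec_format_design_matrix; infer_instance

-- ===== CLAIM (what is proved, stated in full; the proofs are below) =====
def Claim_equal_format_design_matrix : Prop := ∀ (data : List (List Int)), Dom_format_design_matrix data → Pre_format_design_matrix data → Spec_format_design_matrix data (format_design_matrix data)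

-- ===== LEMMAS AND PROOFS =====

theorem format_design_matrix_eq (data : List (List Int)) :
    format_design_matrix data = format_design_matrix_alt data := by
  unfold format_design_matrix format_design_matrix_alt
  dsimp only []
  rw [PySem.List.foldl_append_singleton_eq_map, PySem.List.foldl_append_eq_flatMap]
  simp only [List.nil_append]
  apply List.map_congr_left
  intro i hi
  obtain ⟨h0, hn⟩ := (PySem.List.mem_pyRange_one).1 hi
  rw [PySem.List.foldl_append_eq_flatMap]
  simp only [List.map_append, List.map_cons, List.map_nil, List.map_flatMap]
  rw [PySem.List.pyGetD_map_pyRange_of_nonneg _ _ _ _ h0 hn]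
  congr 1
  apply congrArg (fun g => List.flatMap g data)
  funext s
  rw [PySem.List.pyGetD_map_pyRange_of_nonneg _ _ _ _ h0 hn,
      PySem.List.pyGetD_map_pyRange_of_nonneg _ _ _ _ h0 hn]

-- ===== VERDICT (by name: the statement is the Claim_ definition above) =====
theorem format_design_matrix_spec : Claim_equal_format_design_matrix := by
  intro data _ _
  unfold Spec_format_design_matrix
  exact format_design_matrix_eq data
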